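-- pv_equiv track=rewrite | github.com/RamananVr/Leetcodepython | dynamic_programming/1621_unknown_title.py | numberOfSets
-- ===== SOURCE A (Python) =====
-- def numberOfSets(n: int, k: int) -> int:
--     MOD = 10**9 + 7
--
--     # dp[i][j] represents the number of ways to form j line segments using the first i points
--     dp = [[0] * (k + 1) for _ in range(n + 1)]
--
--     # Base case: 0 line segments can always be formed
--     for i in range(n + 1):
--         dp[i][0] = 1
--
--     # Fill the dp table
--     for i in range(1, n + 1):
--         for j in range(1, k + 1):
--             # Option 1: Do not use the i-th point in the current segment
--             dp[i][j] = dp[i - 1][j]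
--
--             # Option 2: Use the i-th point to extend a segment or start a new segment
--             dp[i][j] += dp[i - 1][j - 1] + dp[i - 1][j]
--             dp[i][j] %= MOD
--
--     return dp[n][k]
-- ===== SOURCE B (Python) =====
-- def numberOfSets(n: int, k: int) -> int:
--     MOD = 10**9 + 7
--     if k == 0:
--         return 1
--     total = 0
--     binom = 1  # exact binomial C(m + k - 1, m)
--     pw = 1     # 2^m mod MOD
--     for m in range(n - k + 1):
--         total = (total + binom * pw) % MOD
--         binom = binom * (m + k) // (m + 1)
--         pw = pw * 2 % MOD
--     return total
-- ===== Notes on version B (the rewrite author's own statement) =====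
-- stated objective: faster
-- what changed: Replaces the O(n*k) dynamic-programming table (dp[i][j] = 2*dp[i-1][j] + dp[i-1][j-1]) by a single O(n-k) pass summing the closed form sum_{t=0}^{n-k} C(t+k-1,t)*2^t mod 10^9+7, maintaining the binomial coefficient incrementally by exact multiply/divide.
import Mathlib
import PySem

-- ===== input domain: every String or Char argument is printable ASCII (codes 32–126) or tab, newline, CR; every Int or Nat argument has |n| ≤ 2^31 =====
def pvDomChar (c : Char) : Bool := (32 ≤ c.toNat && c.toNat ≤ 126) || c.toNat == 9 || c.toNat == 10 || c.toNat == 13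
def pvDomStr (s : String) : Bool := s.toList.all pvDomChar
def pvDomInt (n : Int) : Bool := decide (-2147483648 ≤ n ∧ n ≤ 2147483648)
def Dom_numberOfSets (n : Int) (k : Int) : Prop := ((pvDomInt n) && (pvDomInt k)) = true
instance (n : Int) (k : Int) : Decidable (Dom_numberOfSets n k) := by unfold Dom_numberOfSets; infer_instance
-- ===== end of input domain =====

-- B replaces A's O(n*k) DP table with a single pass summing the closed form C(t+k-1,t)*2^t mod 10^9+7 (objective: faster).


-- ===== PORT A =====
-- list-of-lists dp with Python indexing/assignment; in-range on all admitted inputs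
def pvGetRow (dp : List (List Int)) (i : Int) : List Int := (PySem.List.pyGet? dp i).getD []
def pvGet (dp : List (List Int)) (i j : Int) : Int := (PySem.List.pyGet? (pvGetRow dp i) j).getD 0
def pvSetRow (xs : List Int) (j : Int) (v : Int) : List Int :=
  if 0 ≤ j ∧ j < xs.length then xs.set j.toNat v else xs
def pvSet (dp : List (List Int)) (i j v : Int) : List (List Int) :=
  if 0 ≤ i ∧ i < dp.length then dp.set i.toNat (pvSetRow (pvGetRow dp i) j v) else dp

def numberOfSets (n : Int) (k : Int) : Int :=
  let M : Int := 1000000007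
  let dp : List (List Int) := (PySem.List.pyRange 0 (n + 1)).map (fun _ => List.replicate (k + 1).toNat 0)
  let dp := (PySem.List.pyRange 0 (n + 1)).foldl (fun dp i => pvSet dp i 0 1) dp
  let dp := (PySem.List.pyRange 1 (n + 1)).foldl (fun dp i =>
      (PySem.List.pyRange 1 (k + 1)).foldl (fun dp j =>
        let dp := pvSet dp i j (pvGet dp (i - 1) j)
        let dp := pvSet dp i j (pvGet dp i j + (pvGet dp (i - 1) (j - 1) + pvGet dp (i - 1) j))
        let dp := pvSet dp i j (PySem.Int.mod (pvGet dp i j) M)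
        dp) dp) dp
  pvGet dp n k


-- ===== PORT B =====
-- state st = (total, binom, pw), exactly Source B's loop
def numberOfSets_alt (n : Int) (k : Int) : Int :=
  let M : Int := 1000000007
  if k = 0 then 1
  else
    let st := (PySem.List.pyRange 0 (n - k + 1)).foldl
      (fun (st : Int × Int × Int) m =>
        (PySem.Int.mod (st.1 + st.2.1 * st.2.2) M,
         PySem.Int.floordiv (st.2.1 * (m + k)) (m + 1),
         PySem.Int.mod (st.2.2 * 2) M))
      (0, 1, 1)
    st.1

-- ===== PRECONDITION & SPEC =====
-- Pre_ excludes n < 0 or k < 0, exactly the inputs where A raises IndexError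
-- (empty dp table, or empty rows so that dp[i][0] = 1 fails).
def Pre_numberOfSets (n : Int) (k : Int) : Prop := 0 ≤ n ∧ 0 ≤ k
instance (n : Int) (k : Int) : Decidable (Pre_numberOfSets n k) := by unfold Pre_numberOfSets; infer_instance
def pvWitness_numberOfSets : Int × Int := (4, 2)

def Spec_numberOfSets (n : Int) (k : Int) (out : Int) : Prop := out = numberOfSets_alt n k
instance (n : Int) (k : Int) (out : Int) : Decidable (Spec_numberOfSets n k out) := by unfold Spec_numberOfSets; infer_instance

-- ===== CLAIM (what is proved, stated in full; the proofs are below) =====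
def Claim_equal_numberOfSets : Prop := ∀ (n : Int) (k : Int), Dom_numberOfSets n k → Pre_numberOfSets n k → Spec_numberOfSets n k (numberOfSets n k)

-- ===== LEMMAS AND PROOFS =====

-- A's recurrence with the running mod, as a function of (row, column)
def pvFm : Nat → Nat → Int
  | _, 0 => 1
  | 0, _ + 1 => 0
  | i + 1, j + 1 =>
      PySem.Int.mod (pvFm i (j + 1) + (pvFm i j + pvFm i (j + 1))) 1000000007

-- the same recurrence without the mod
def pvF : Nat → Nat → Nat
  | _, 0 => 1
  | 0, _ + 1 => 0
  | i + 1, j + 1 => pvF i (j + 1) + (pvF i j + pvF i (j + 1))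

-- the closed form B sums
def pvT : Nat → Nat → Nat
  | _, 0 => 1
  | n, j + 1 => ∑ t ∈ Finset.range (n - j), (t + j).choose t * 2 ^ t

def pvUpd (dp : Int → Int → Int) (i j v : Int) : Int → Int → Int :=
  fun i' j' => if i' = i ∧ j' = j then v else dp i' j'

def pvBodyL (i : Int) (dp : List (List Int)) (j : Int) : List (List Int) :=
  let dp := pvSet dp i j (pvGet dp (i - 1) j)
  let dp := pvSet dp i j (pvGet dp i j + (pvGet dp (i - 1) (j - 1) + pvGet dp (i - 1) j))
  pvSet dp i j (PySem.Int.mod (pvGet dp i j) 1000000007)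

def pvBodyJ (i : Int) (dp : Int → Int → Int) (j : Int) : Int → Int → Int :=
  let dp := pvUpd dp i j (dp (i - 1) j)
  let dp := pvUpd dp i j (dp i j + (dp (i - 1) (j - 1) + dp (i - 1) j))
  pvUpd dp i j (PySem.Int.mod (dp i j) 1000000007)

theorem numberOfSets_def (n k : Int) : numberOfSets n k =
    pvGet ((PySem.List.pyRange 1 (n + 1)).foldl
      (fun dp i => (PySem.List.pyRange 1 (k + 1)).foldl (pvBodyL i) dp)
      ((PySem.List.pyRange 0 (n + 1)).foldl (fun dp i => pvSet dp i 0 1)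
        ((PySem.List.pyRange 0 (n + 1)).map (fun _ => List.replicate (k + 1).toNat 0)))) n k := rfl

def pvShape (N K : Nat) (dp : List (List Int)) : Prop :=
  dp.length = N + 1 ∧ ∀ r ∈ dp, r.length = K + 1

def pvAgr (dp : List (List Int)) (f : Int → Int → Int) : Prop :=
  ∀ i j : Int, 0 ≤ i → 0 ≤ j → pvGet dp i j = f i j


theorem pvGet_nonneg (dp : List (List Int)) (i j : Int) (hi : 0 ≤ i) (hj : 0 ≤ j) :
    pvGet dp i j = (((dp[i.toNat]?).getD [])[j.toNat]?).getD 0 := by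
  rw [pvGet, pvGetRow, show i = ((i.toNat : Nat) : Int) by omega,
      show j = ((j.toNat : Nat) : Int) by omega,
      PySem.List.pyGet?_natCast, PySem.List.pyGet?_natCast]
  simp only [Int.toNat_natCast]

theorem pvSet_shape {N K : Nat} {dp : List (List Int)} (hsh : pvShape N K dp) (i j v : Int) :
    pvShape N K (pvSet dp i j v) := by
  obtain ⟨hlen, hrow⟩ := hsh
  unfold pvSet
  split_ifs with h
  · refine ⟨by simpa using hlen, ?_⟩
    intro r hr
    rcases List.mem_iff_getElem.mp hr with ⟨t, ht, rfl⟩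
    rw [List.getElem_set]
    split_ifs with he
    · unfold pvSetRow
      have hmem : pvGetRow dp i ∈ dp := by
        rw [pvGetRow, show i = ((i.toNat : Nat) : Int) by omega, PySem.List.pyGet?_natCast,
            List.getElem?_eq_getElem (by omega)]
        exact List.getElem_mem _
      split_ifs with hj
      · simpa using hrow _ hmem
      · exact hrow _ hmem
    · exact hrow _ (by exact List.getElem_mem _)
  · exact ⟨hlen, hrow⟩

theorem pvGet_pvSet {N K : Nat} {dp : List (List Int)} (hsh : pvShape N K dp)
    (i j v : Int) (hi : 0 ≤ i ∧ i ≤ (N : Int)) (hj : 0 ≤ j ∧ j ≤ (K : Int))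
    (i' j' : Int) (hi' : 0 ≤ i') (hj' : 0 ≤ j') :
    pvGet (pvSet dp i j v) i' j' = (if i' = i ∧ j' = j then v else pvGet dp i' j') := by
  obtain ⟨hlen, hrow⟩ := hsh
  have hilt : 0 ≤ i ∧ i < (dp.length : Int) := by omega
  have hmem : pvGetRow dp i ∈ dp := by
    rw [pvGetRow, show i = ((i.toNat : Nat) : Int) by omega, PySem.List.pyGet?_natCast,
        List.getElem?_eq_getElem (by omega)]
    exact List.getElem_mem _
  have hrlen : (pvGetRow dp i).length = K + 1 := hrow _ hmem
  rw [pvSet, if_pos hilt, pvGet_nonneg _ _ _ hi' hj', pvGet_nonneg _ _ _ hi' hj']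
  rw [List.getElem?_set]
  by_cases hii : i' = i
  · subst hii
    rw [if_pos (by omega), if_pos (by omega)]
    have hget : dp[i'.toNat]? = some (pvGetRow dp i') := by
      have hc : PySem.List.pyGet? dp i' = dp[i'.toNat]? := by
        rw [show i' = ((i'.toNat : Nat) : Int) from by omega, PySem.List.pyGet?_natCast,
            Int.toNat_natCast]
      rw [pvGetRow, hc, List.getElem?_eq_getElem (show i'.toNat < dp.length from by omega)]
      simp
    rw [hget]
    simp only [Option.getD_some]
    rw [pvSetRow, if_pos (by omega), List.getElem?_set]
    by_cases hjj : j' = j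
    · subst hjj
      rw [if_pos (by omega), if_pos (by omega)]
      simp
    · have : ¬ (j.toNat = j'.toNat) := by omega
      rw [if_neg this, if_neg (by tauto)]
  · have : ¬ (i.toNat = i'.toNat) := by omega
    rw [if_neg this, if_neg (by tauto)]

-- initial table
theorem pv_init (N K : Nat) :
    pvShape N K ((PySem.List.pyRange 0 ((N : Int) + 1)).map (fun _ => List.replicate (((K : Int)) + 1).toNat 0))
    ∧ pvAgr ((PySem.List.pyRange 0 ((N : Int) + 1)).map (fun _ => List.replicate (((K : Int)) + 1).toNat 0))
        (fun _ _ => 0) := by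
  constructor
  · constructor
    · rw [show ((N : Int) + 1) = (((N + 1 : Nat)) : Int) by push_cast; ring,
          PySem.List.pyRange_zero_natCast]
      simp
    · intro r hr
      rcases List.mem_map.mp hr with ⟨a, _, rfl⟩
      simp
  · intro i j hi hj
    rw [pvGet_nonneg _ _ _ hi hj]
    simp only [List.getElem?_map]
    cases hx : (PySem.List.pyRange 0 ((N : Int) + 1))[i.toNat]? with
    | none => simp
    | some a =>
      simp only [Option.map_some, Option.getD_some, List.getElem?_replicate]
      split_ifs <;> simp

theorem pvAgr_set {N K : Nat} {dp : List (List Int)} {f : Int → Int → Int}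
    (hsh : pvShape N K dp) (ha : pvAgr dp f) {i j vL vF : Int}
    (hi : 0 ≤ i ∧ i ≤ (N : Int)) (hj : 0 ≤ j ∧ j ≤ (K : Int)) (hv : vL = vF) :
    pvAgr (pvSet dp i j vL) (pvUpd f i j vF) := by
  intro i' j' hi' hj'
  rw [pvGet_pvSet hsh i j vL hi hj i' j' hi' hj', pvUpd]
  split_ifs
  · exact hv
  · exact ha i' j' hi' hj'

theorem pvAgr_step {N K : Nat} (i j : Int) (hi : 1 ≤ i ∧ i ≤ (N : Int)) (hj : 1 ≤ j ∧ j ≤ (K : Int))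
    {dp : List (List Int)} {f : Int → Int → Int} (hsh : pvShape N K dp) (ha : pvAgr dp f) :
    pvShape N K (pvBodyL i dp j) ∧ pvAgr (pvBodyL i dp j) (pvBodyJ i f j) := by
  have hib : 0 ≤ i ∧ i ≤ (N : Int) := ⟨by omega, hi.2⟩
  have hjb : 0 ≤ j ∧ j ≤ (K : Int) := ⟨by omega, hj.2⟩
  have h1 : pvGet dp (i - 1) j = f (i - 1) j := ha _ _ (by omega) (by omega)
  have hsh1 : pvShape N K (pvSet dp i j (pvGet dp (i - 1) j)) := pvSet_shape hsh _ _ _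
  have ha1 : pvAgr (pvSet dp i j (pvGet dp (i - 1) j)) (pvUpd f i j (f (i - 1) j)) :=
    pvAgr_set hsh ha hib hjb h1
  have h2 : pvGet (pvSet dp i j (pvGet dp (i - 1) j)) i j
        + (pvGet (pvSet dp i j (pvGet dp (i - 1) j)) (i - 1) (j - 1)
            + pvGet (pvSet dp i j (pvGet dp (i - 1) j)) (i - 1) j)
      = pvUpd f i j (f (i - 1) j) i j
        + (pvUpd f i j (f (i - 1) j) (i - 1) (j - 1) + pvUpd f i j (f (i - 1) j) (i - 1) j) := by
    rw [ha1 _ _ (by omega) (by omega), ha1 _ _ (by omega) (by omega), ha1 _ _ (by omega) (by omega)]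
  have hsh2 := pvSet_shape hsh1 i j (pvGet (pvSet dp i j (pvGet dp (i - 1) j)) i j
        + (pvGet (pvSet dp i j (pvGet dp (i - 1) j)) (i - 1) (j - 1)
            + pvGet (pvSet dp i j (pvGet dp (i - 1) j)) (i - 1) j))
  have ha2 := pvAgr_set hsh1 ha1 hib hjb h2
  have h3 := congrArg (fun x => PySem.Int.mod x 1000000007) (ha2 i j (by omega) (by omega))
  have ha3 := pvAgr_set hsh2 ha2 hib hjb h3
  exact ⟨pvSet_shape hsh2 _ _ _, ha3⟩

theorem pvAgr_fold_inner {N K : Nat} (i : Int) (hi : 1 ≤ i ∧ i ≤ (N : Int)) :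
    ∀ (l : List Int), (∀ j ∈ l, 1 ≤ j ∧ j ≤ (K : Int)) →
    ∀ (dp : List (List Int)) (f : Int → Int → Int), pvShape N K dp → pvAgr dp f →
    pvShape N K (l.foldl (pvBodyL i) dp)
      ∧ pvAgr (l.foldl (pvBodyL i) dp) (l.foldl (pvBodyJ i) f) := by
  intro l
  induction l with
  | nil => intro _ dp f hsh ha; exact ⟨hsh, ha⟩
  | cons a l ih =>
    intro hmem dp f hsh ha
    have hstep := pvAgr_step i a hi (hmem a (by simp)) hsh ha
    exact ih (fun j hj => hmem j (by simp [hj])) _ _ hstep.1 hstep.2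

theorem pvAgr_fold_outer {N K : Nat} :
    ∀ (l : List Int), (∀ i ∈ l, 1 ≤ i ∧ i ≤ (N : Int)) →
    ∀ (dp : List (List Int)) (f : Int → Int → Int), pvShape N K dp → pvAgr dp f →
    pvShape N K (l.foldl (fun dp i => (PySem.List.pyRange 1 ((K : Int) + 1)).foldl (pvBodyL i) dp) dp)
      ∧ pvAgr (l.foldl (fun dp i => (PySem.List.pyRange 1 ((K : Int) + 1)).foldl (pvBodyL i) dp) dp)
          (l.foldl (fun f i => (PySem.List.pyRange 1 ((K : Int) + 1)).foldl (pvBodyJ i) f) f) := by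
  intro l
  induction l with
  | nil => intro _ dp f hsh ha; exact ⟨hsh, ha⟩
  | cons a l ih =>
    intro hmem dp f hsh ha
    have hstep := pvAgr_fold_inner a (hmem a (by simp)) (PySem.List.pyRange 1 ((K : Int) + 1))
      (fun j hj => by rw [PySem.List.mem_pyRange_one] at hj; omega) dp f hsh ha
    exact ih (fun i hi => hmem i (by simp [hi])) _ _ hstep.1 hstep.2

theorem pvAgr_fold_first {N K : Nat} :
    ∀ (l : List Int), (∀ i ∈ l, 0 ≤ i ∧ i ≤ (N : Int)) →
    ∀ (dp : List (List Int)) (f : Int → Int → Int), pvShape N K dp → pvAgr dp f →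
    pvShape N K (l.foldl (fun dp i => pvSet dp i 0 1) dp)
      ∧ pvAgr (l.foldl (fun dp i => pvSet dp i 0 1) dp) (l.foldl (fun f i => pvUpd f i 0 1) f) := by
  intro l
  induction l with
  | nil => intro _ dp f hsh ha; exact ⟨hsh, ha⟩
  | cons a l ih =>
    intro hmem dp f hsh ha
    have ha1 := pvAgr_set (vL := 1) (vF := 1) hsh ha (hmem a (by simp)) ⟨le_refl 0, by positivity⟩ rfl
    exact ih (fun i hi => hmem i (by simp [hi])) _ _ (pvSet_shape hsh _ _ _) ha1

def pvTbl (N K : Nat) (r : Int) : Int → Int → Int := fun i j =>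
  if 0 ≤ i ∧ i ≤ (N : Int) ∧ j = 0 then 1
  else if 1 ≤ i ∧ i ≤ r ∧ 1 ≤ j ∧ j ≤ (K : Int) then pvFm i.toNat j.toNat
  else 0

def pvRow (N K : Nat) (i c : Int) : Int → Int → Int := fun i' j' =>
  if i' = i ∧ 1 ≤ j' ∧ j' ≤ c then pvFm i'.toNat j'.toNat else pvTbl N K (i - 1) i' j'

theorem pvFm_zero_succ (m : Nat) (h : 1 ≤ m) : pvFm 0 m = 0 := by
  obtain ⟨m', rfl⟩ : ∃ m', m = m' + 1 := ⟨m - 1, by omega⟩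
  rfl

theorem pvFm_base (m : Nat) : pvFm m 0 = 1 := by cases m <;> rfl

theorem pvFm_step (a b : Nat) :
    pvFm (a + 1) (b + 1)
      = PySem.Int.mod (pvFm a (b + 1) + (pvFm a b + pvFm a (b + 1))) 1000000007 := rfl

theorem fold1_eval (l : List Int) (dp0 : Int → Int → Int) (i' j' : Int) :
    (l.foldl (fun dp i => pvUpd dp i 0 1) dp0) i' j'
      = if i' ∈ l ∧ j' = 0 then 1 else dp0 i' j' := by
  induction l generalizing dp0 with
  | nil => simp
  | cons a l ih =>
    simp only [List.foldl_cons, ih, List.mem_cons, pvUpd]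
    split_ifs <;> tauto

theorem pvRow_zero (N K : Nat) (i : Int) : pvRow N K i 0 = pvTbl N K (i - 1) := by
  funext i' j'
  simp only [pvRow]
  split_ifs with h
  · omega
  · rfl

theorem pvRow_read_left (N K : Nat) (i c j : Int) (h1 : 1 ≤ i) (_h2 : i ≤ (N : Int))
    (h3 : 1 ≤ j) (h4 : j ≤ (K : Int)) :
    pvRow N K i c (i - 1) j = pvFm (i - 1).toNat j.toNat := by
  simp only [pvRow, pvTbl]
  rw [if_neg (by omega), if_neg (by omega)]
  by_cases hi : 2 ≤ i
  · rw [if_pos (by omega)]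
  · rw [if_neg (by omega), (by omega : (i - 1).toNat = 0),
        pvFm_zero_succ j.toNat (by omega)]

theorem pvRow_read_diag (N K : Nat) (i c j : Int) (h1 : 1 ≤ i) (h2 : i ≤ (N : Int))
    (h3 : 1 ≤ j) (h4 : j ≤ (K : Int)) :
    pvRow N K i c (i - 1) (j - 1) = pvFm (i - 1).toNat (j - 1).toNat := by
  simp only [pvRow, pvTbl]
  rw [if_neg (by omega)]
  by_cases hj : j = 1
  · rw [if_pos (by omega), (by omega : (j - 1).toNat = 0), pvFm_base]
  · rw [if_neg (by omega)]
    by_cases hi : 2 ≤ i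
    · rw [if_pos (by omega)]
    · rw [if_neg (by omega), (by omega : (i - 1).toNat = 0),
          pvFm_zero_succ _ (by omega)]

theorem pvBodyJ_step (N K : Nat) (i j : Int) (h1 : 1 ≤ i) (h2 : i ≤ (N : Int))
    (h3 : 1 ≤ j) (h4 : j ≤ (K : Int)) :
    pvBodyJ i (pvRow N K i (j - 1)) j = pvRow N K i j := by
  funext i' j'
  by_cases hc : i' = i ∧ j' = j
  · obtain ⟨rfl, rfl⟩ := hc
    have e0 : ¬((i' : Int) - 1 = i') := by omega
    simp only [pvBodyJ, pvUpd, e0, false_and, if_false, and_self, if_true]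
    rw [pvRow_read_left N K i' (j' - 1) j' h1 h2 h3 h4,
        pvRow_read_diag N K i' (j' - 1) j' h1 h2 h3 h4]
    have hrhs : pvRow N K i' j' i' j' = pvFm i'.toNat j'.toNat := by
      simp [pvRow, h3]
    rw [hrhs, (by omega : i'.toNat = (i' - 1).toNat + 1),
        (by omega : j'.toNat = (j' - 1).toNat + 1), pvFm_step]
  · have hb : pvBodyJ i (pvRow N K i (j - 1)) j i' j' = pvRow N K i (j - 1) i' j' := by
      simp only [pvBodyJ, pvUpd, if_neg hc]
    rw [hb]
    simp only [pvRow]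
    by_cases hi : i' = i
    · have hj : j' ≠ j := fun h => hc ⟨hi, h⟩
      subst hi
      split_ifs <;> first | rfl | omega
    · rw [if_neg (by tauto), if_neg (by tauto)]

theorem innerFold (N K : Nat) (i : Int) (h1 : 1 ≤ i) (h2 : i ≤ (N : Int)) :
    ∀ c : Nat, c ≤ K →
    (PySem.List.pyRange 1 ((c : Int) + 1)).foldl (pvBodyJ i) (pvTbl N K (i - 1)) = pvRow N K i c := by
  intro c
  induction c with
  | zero =>
    intro _
    rw [show ((0 : Nat) : Int) + 1 = 1 by norm_num,
        show PySem.List.pyRange (1 : Int) 1 = [] from by decide]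
    simp [pvRow_zero]
  | succ c ih =>
    intro hc
    rw [show (((c + 1 : Nat)) : Int) + 1 = ((c : Int) + 1) + 1 by push_cast; ring,
        PySem.List.pyRange_one_succ_right (a := 1) (b := (c : Int) + 1) (by omega),
        List.foldl_append, ih (by omega)]
    simp only [List.foldl_cons, List.foldl_nil]
    have hstep := pvBodyJ_step N K i ((c : Int) + 1) h1 h2 (by omega) (by exact_mod_cast Nat.cast_le.mpr hc)
    rw [show ((c : Int) + 1) - 1 = (c : Int) by ring] at hstep
    exact hstep

theorem pvRow_last (N K : Nat) (i : Int) (h1 : 1 ≤ i) :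
    pvRow N K i (K : Int) = pvTbl N K i := by
  funext i' j'
  simp only [pvRow, pvTbl]
  split_ifs <;> first | rfl | omega

theorem outerFold (N K : Nat) :
    ∀ r : Nat, r ≤ N →
    (PySem.List.pyRange 1 ((r : Int) + 1)).foldl
      (fun dp i => (PySem.List.pyRange 1 ((K : Int) + 1)).foldl (pvBodyJ i) dp)
      (pvTbl N K 0) = pvTbl N K (r : Int) := by
  intro r
  induction r with
  | zero =>
    intro _
    rw [show ((0 : Nat) : Int) + 1 = 1 by norm_num,
        show PySem.List.pyRange (1 : Int) 1 = [] from by decide]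
    rfl
  | succ r ih =>
    intro hr
    rw [show (((r + 1 : Nat)) : Int) + 1 = ((r : Int) + 1) + 1 by push_cast; ring,
        PySem.List.pyRange_one_succ_right (a := 1) (b := (r : Int) + 1) (by omega),
        List.foldl_append, ih (by omega)]
    simp only [List.foldl_cons, List.foldl_nil]
    have h2 : (r : Int) + 1 ≤ (N : Int) := by exact_mod_cast Nat.cast_le.mpr hr
    have hin := innerFold N K ((r : Int) + 1) (by omega) h2 K (le_refl K)
    rw [show ((r : Int) + 1) - 1 = (r : Int) by ring] at hin
    rw [hin, pvRow_last N K _ (by omega)]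
    norm_cast

theorem init_eval (N K : Nat) :
    ((PySem.List.pyRange 0 ((N : Int) + 1)).foldl (fun dp i => pvUpd dp i 0 1) (fun _ _ => 0))
      = pvTbl N K 0 := by
  funext i' j'
  rw [fold1_eval]
  simp only [pvTbl, PySem.List.mem_pyRange_one]
  split_ifs <;> first | rfl | omega

theorem numberOfSets_eval (N K : Nat) : numberOfSets (N : Int) (K : Int) = pvFm N K := by
  rw [numberOfSets_def]
  obtain ⟨hsh0, ha0⟩ := pv_init N K
  have h1 := pvAgr_fold_first (N := N) (K := K) (PySem.List.pyRange 0 ((N : Int) + 1))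
    (fun i hi => by rw [PySem.List.mem_pyRange_one] at hi; omega) _ _ hsh0 ha0
  have h2 := pvAgr_fold_outer (N := N) (K := K) (PySem.List.pyRange 1 ((N : Int) + 1))
    (fun i hi => by rw [PySem.List.mem_pyRange_one] at hi; omega) _ _ h1.1 h1.2
  have hval := h2.2 (N : Int) (K : Int) (by positivity) (by positivity)
  rw [hval, init_eval N K, outerFold N K N (le_refl N)]
  simp only [pvTbl]
  split_ifs with ha hb
  · rw [(by omega : K = 0), pvFm_base]
  · rw [(by omega : ((N : Int)).toNat = N), (by omega : ((K : Int)).toNat = K)]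
  · rw [(by omega : N = 0), pvFm_zero_succ K (by omega)]

theorem pvFm_eq_pvF (i j : Nat) : pvFm i j = (pvF i j : Int) % 1000000007 := by
  induction i generalizing j with
  | zero => cases j <;> simp [pvFm, pvF]
  | succ i ih =>
    cases j with
    | zero => simp [pvFm, pvF]
    | succ j =>
      rw [pvFm, pvF, PySem.Int.mod_eq_emod_of_pos (by norm_num), ih, ih]
      push_cast
      omega

theorem geom_aux (m : Nat) : ∑ t ∈ Finset.range (m + 1), 2 ^ t = 2 * (∑ t ∈ Finset.range m, 2 ^ t) + 1 := by
  rw [Finset.sum_range_succ']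
  simp [pow_succ, Finset.mul_sum, mul_comm]

theorem pvT_succ_succ (i j : Nat) :
    pvT (i + 1) (j + 1) = 2 * pvT i (j + 1) + pvT i j := by
  cases j with
  | zero =>
    simp only [pvT, Nat.sub_zero]
    simpa using geom_aux i
  | succ j =>
    simp only [pvT]
    by_cases h : i ≤ j
    · have h1 : i + 1 - (j + 1) = 0 := by omega
      have h2 : i - (j + 1) = 0 := by omega
      have h3 : i - j = 0 := by omega
      simp [h1, h2, h3]
    · obtain ⟨L, rfl⟩ : ∃ L, i = j + 1 + L := ⟨i - (j+1), by omega⟩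
      have h1 : j + 1 + L + 1 - (j + 1) = L + 1 := by omega
      have h2 : j + 1 + L - (j + 1) = L := by omega
      have h3 : j + 1 + L - j = L + 1 := by omega
      rw [h1, h2, h3, Finset.sum_range_succ', Finset.sum_range_succ',
          Finset.mul_sum]
      have : ∀ t ∈ Finset.range L,
          (t + 1 + (j + 1)).choose (t + 1) * 2 ^ (t + 1)
          = 2 * ((t + (j + 1)).choose t * 2 ^ t) + (t + 1 + j).choose (t + 1) * 2 ^ (t + 1) := by
        intro t _
        have e1 : t + 1 + (j + 1) = (t + (j + 1)) + 1 := by ring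
        have e2 : t + 1 + j = t + (j + 1) := by ring
        rw [e1, Nat.choose_succ_succ' (t + (j+1)) t, e2]
        ring
      rw [Finset.sum_congr rfl this, Finset.sum_add_distrib]
      simp
      omega


theorem pvF_eq_pvT (n j : Nat) : pvF n j = pvT n j := by
  induction n generalizing j with
  | zero => cases j <;> simp [pvF, pvT]
  | succ n ih =>
    cases j with
    | zero => simp [pvF, pvT]
    | succ j => rw [pvF, ih, ih, pvT_succ_succ]; ring

-- loop invariant of B's fold, with K' = k - 1
theorem alt_fold_inv (K' : Nat) (len : Nat) :
    (PySem.List.pyRange 0 (len : Int)).foldl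
      (fun (st : Int × Int × Int) m =>
        (PySem.Int.mod (st.1 + st.2.1 * st.2.2) 1000000007,
         PySem.Int.floordiv (st.2.1 * (m + ((K' + 1 : Nat) : Int))) (m + 1),
         PySem.Int.mod (st.2.2 * 2) 1000000007))
      (0, 1, 1)
    = (((∑ t ∈ Finset.range len, (t + K').choose t * 2 ^ t : Nat) : Int) % 1000000007,
       (((len + K').choose len : Nat) : Int),
       ((2 ^ len : Nat) : Int) % 1000000007) := by
  induction len with
  | zero =>
    rw [show ((0 : Nat) : Int) = 0 by norm_num,
        show PySem.List.pyRange (0 : Int) 0 = [] from by decide]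
    simp
  | succ len ih =>
    rw [show (((len + 1 : Nat)) : Int) = ((len : Int)) + 1 by push_cast; ring,
        PySem.List.pyRange_one_succ_right (a := 0) (b := (len : Int)) (by positivity),
        List.foldl_append, ih]
    simp only [List.foldl_cons, List.foldl_nil, Prod.mk.injEq]
    have hm : ∀ x : Int, Int.ModEq 1000000007 (x % 1000000007) x :=
      fun x => Int.emod_emod_of_dvd x dvd_rfl
    refine ⟨?_, ?_, ?_⟩
    · -- total
      rw [PySem.Int.mod_eq_emod_of_pos (by norm_num)]
      have h1 :
          ((((∑ t ∈ Finset.range len, (t + K').choose t * 2 ^ t : Nat) : Int) % 1000000007)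
            + (((len + K').choose len : Nat) : Int) * (((2 ^ len : Nat) : Int) % 1000000007)) % 1000000007
          = ((((∑ t ∈ Finset.range len, (t + K').choose t * 2 ^ t : Nat) : Int))
            + (((len + K').choose len : Nat) : Int) * (((2 ^ len : Nat) : Int))) % 1000000007 :=
        (hm _).add ((Int.ModEq.refl _).mul (hm _))
      rw [h1]
      congr 1
      rw [Finset.sum_range_succ]
      push_cast
      ring
    · -- binom
      have e1 : ((len : Int)) + (((K' + 1 : Nat)) : Int) = (((len + K' + 1 : Nat)) : Int) := by
        push_cast; ring
      have e2 : ((len : Int)) + 1 = (((len + 1 : Nat)) : Int) := by push_cast; ring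
      rw [e1, e2, show (((len + K').choose len : Nat) : Int) * ((len + K' + 1 : Nat) : Int)
            = (((len + K').choose len * (len + K' + 1) : Nat) : Int) by push_cast; ring,
          PySem.Int.floordiv_natCast]
      congr 1
      have key : (len + K' + 1) * (len + K').choose len = (len + K' + 1).choose (len + 1) * (len + 1) :=
        Nat.add_one_mul_choose_eq (len + K') len
      rw [Nat.mul_comm ((len + K').choose len) (len + K' + 1), key, Nat.mul_div_cancel _ (by omega)]
      congr 1
      omega
    · -- power
      rw [PySem.Int.mod_eq_emod_of_pos (by norm_num)]
      have h1 : ((((2 ^ len : Nat) : Int) % 1000000007) * 2) % 1000000007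
          = ((((2 ^ len : Nat) : Int)) * 2) % 1000000007 :=
        (hm _).mul (Int.ModEq.refl 2)
      rw [h1]
      congr 1
      try push_cast [pow_succ]
      try ring
  
theorem numberOfSets_alt_eval (N K : Nat) :
    numberOfSets_alt (N : Int) (K : Int) = ((pvT N K : Nat) : Int) % 1000000007 := by
  cases K with
  | zero => simp [numberOfSets_alt, pvT]
  | succ K' =>
    have hk : ((K' + 1 : Nat) : Int) ≠ 0 := by push_cast; omega
    simp only [numberOfSets_alt, if_neg hk]
    by_cases hNK : K' + 1 ≤ N
    · have e : (N : Int) - ((K' + 1 : Nat) : Int) + 1 = (((N - K' : Nat)) : Int) := by push_cast; omega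
      rw [e, alt_fold_inv K' (N - K')]
      simp only [pvT]
    · have e : (N : Int) - ((K' + 1 : Nat) : Int) + 1 ≤ 0 := by push_cast; omega
      have hempty : PySem.List.pyRange 0 ((N : Int) - ((K' + 1 : Nat) : Int) + 1) = [] := by
        rw [List.eq_nil_iff_forall_not_mem]
        intro x hx
        rw [PySem.List.mem_pyRange_one] at hx
        omega
      rw [hempty]
      simp only [List.foldl_nil]
      have : N - K' = 0 := by omega
      simp [pvT, this]


-- ===== VERDICT (by name: the statement is the Claim_ definition above) =====
theorem numberOfSets_spec : Claim_equal_numberOfSets := by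
  intro n k _ hpre
  obtain ⟨N, rfl⟩ := Int.eq_ofNat_of_zero_le hpre.1
  obtain ⟨K, rfl⟩ := Int.eq_ofNat_of_zero_le hpre.2
  unfold Spec_numberOfSets
  rw [numberOfSets_eval, numberOfSets_alt_eval, pvFm_eq_pvF, pvF_eq_pvT]
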